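-- pv_equiv track=rewrite | github.com/linc-lion/linc-cv | linc_cv/ml.py | sort_lion_xy
-- ===== SOURCE A (Python) =====
-- from operator import itemgetter
--
-- def sort_lion_xy(x, y):
--     # hdf5 requires sorted ascending array indicies
--     s_xy = sorted(zip(x, y), key=itemgetter(0))
--
--     # remove duplicates
--     xf_s = set()
--     xf = []
--     yf = []
--     for x, y in s_xy:
--         if x in xf_s:
--             continue
--         xf_s.add(x)
--         xf.append(x)
--         yf.append(y)
--     return xf, yf
-- ===== SOURCE B (Python) =====
-- def sort_lion_xy(x, y):
--     # Dedup first via a dict keeping the first-seen y per x, then sort unique keys.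
--     d = {}
--     for xi, yi in zip(x, y):
--         if xi not in d:
--             d[xi] = yi
--     xf = []
--     yf = []
--     for k in sorted(d):
--         xf.append(k)
--         yf.append(d[k])
--     return xf, yf
-- ===== Notes on version B (the rewrite author's own statement) =====
-- stated objective: alternative
-- what changed: Replaces A's stable-sort-of-all-pairs followed by a set-based linear dedup with the reverse phase order: one dict pass over the original pairs keeps the first-seen y per x, then only the unique keys are sorted and the result lists are read off the dict.
import Mathlib
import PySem

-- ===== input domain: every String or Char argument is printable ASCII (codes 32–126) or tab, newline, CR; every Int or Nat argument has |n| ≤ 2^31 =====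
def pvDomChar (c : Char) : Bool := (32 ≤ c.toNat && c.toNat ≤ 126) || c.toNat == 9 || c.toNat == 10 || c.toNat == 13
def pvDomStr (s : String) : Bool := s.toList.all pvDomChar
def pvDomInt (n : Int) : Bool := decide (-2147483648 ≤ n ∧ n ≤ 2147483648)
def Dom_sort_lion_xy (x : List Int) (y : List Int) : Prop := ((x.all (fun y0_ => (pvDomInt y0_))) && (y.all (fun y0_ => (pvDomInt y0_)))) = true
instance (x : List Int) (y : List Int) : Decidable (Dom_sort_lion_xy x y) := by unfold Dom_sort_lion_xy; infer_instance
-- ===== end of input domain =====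

-- B dedups first (one dict pass keeping the first-seen y per x) and sorts only the unique keys,
-- reversing A's sort-all-pairs-then-linear-dedup phase order; objective: alternative decomposition.

-- ===== PORT A =====
def sort_lion_xy (x : List Int) (y : List Int) : List Int × List Int :=
  let s_xy := PySem.List.sorted (x.zip y) (fun p => p.1) false
  let st := s_xy.foldl
    (fun (st : PySem.Set Int × List Int × List Int) p =>
      if PySem.Set.contains st.1 p.1 then st
      else (PySem.Set.add st.1 p.1, st.2.1 ++ [p.1], st.2.2 ++ [p.2]))
    (PySem.Set.empty, [], [])
  (st.2.1, st.2.2)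

-- ===== PORT B =====
def sort_lion_xy_alt (x : List Int) (y : List Int) : List Int × List Int :=
  let d := (x.zip y).foldl
    (fun (d : PySem.Dict Int Int) p => if d.contains p.1 then d else d.insert p.1 p.2)
    PySem.Dict.empty
  let ks := PySem.List.sorted d.keys (fun k => k) false
  -- Python's d[k] never raises here since k ranges over d's keys; ported as getD with an unused default.
  let st := ks.foldl (fun (st : List Int × List Int) k => (st.1 ++ [k], st.2 ++ [d.getD k 0])) ([], [])
  (st.1, st.2)

-- ===== PRECONDITION & SPEC =====
def Spec_sort_lion_xy (x : List Int) (y : List Int) (out : List Int × List Int) : Prop := out = sort_lion_xy_alt x y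
instance (x : List Int) (y : List Int) (out : List Int × List Int) : Decidable (Spec_sort_lion_xy x y out) := by unfold Spec_sort_lion_xy; infer_instance

-- ===== CLAIM (what is proved, stated in full; the proofs are below) =====
def Claim_equal_sort_lion_xy : Prop := ∀ (x : List Int) (y : List Int), Dom_sort_lion_xy x y → Spec_sort_lion_xy x y (sort_lion_xy x y)

-- ===== LEMMAS AND PROOFS =====

-- The pairs A's dedup loop keeps, starting from a set s of already-seen keys.
def pvFirsts (s : PySem.Set Int) : List (Int × Int) → List (Int × Int)
  | [] => []
  | p :: t => if PySem.Set.contains s p.1 then pvFirsts s t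
              else p :: pvFirsts (PySem.Set.add s p.1) t

-- A's fold = (seen-set, xf ++ keys of kept pairs, yf ++ values of kept pairs)
theorem pvA_fold (l : List (Int × Int)) (s : PySem.Set Int) (xf yf : List Int) :
    l.foldl (fun (st : PySem.Set Int × List Int × List Int) p =>
      if PySem.Set.contains st.1 p.1 then st
      else (PySem.Set.add st.1 p.1, st.2.1 ++ [p.1], st.2.2 ++ [p.2])) (s, xf, yf)
    = (l.foldl (fun s p => if PySem.Set.contains s p.1 then s else PySem.Set.add s p.1) s,
       xf ++ (pvFirsts s l).map Prod.fst, yf ++ (pvFirsts s l).map Prod.snd) := by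
  induction l generalizing s xf yf with
  | nil => simp [pvFirsts]
  | cons p t ih =>
    simp only [List.foldl_cons, pvFirsts]
    by_cases h : PySem.Set.contains s p.1 = true
    · rw [if_pos h, if_pos h, if_pos h, ih]
    · rw [if_neg h, if_neg h, if_neg h, ih]
      simp

theorem pvMem_firsts (p : Int × Int) (l : List (Int × Int)) (s : PySem.Set Int) :
    p ∈ pvFirsts s l ↔ PySem.Set.contains s p.1 = false ∧ l.find? (fun q => q.1 == p.1) = some p := by
  induction l generalizing s with
  | nil => simp [pvFirsts]
  | cons q t ih =>
    by_cases h : PySem.Set.contains s q.1 = true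
    · rw [pvFirsts]
      simp only [h, if_pos]
      rw [ih]
      constructor
      · rintro ⟨hns, hf⟩
        have hne : ¬ (q.1 == p.1) = true := by
          intro hb
          have : q.1 = p.1 := by simpa using hb
          rw [this] at h; rw [h] at hns; exact Bool.true_eq_false.mp hns
        refine ⟨hns, ?_⟩
        rw [List.find?_cons_of_neg (by simpa using hne), hf]
      · rintro ⟨hns, hf⟩
        have hne : ¬ (q.1 == p.1) = true := by
          intro hb
          have : q.1 = p.1 := by simpa using hb
          rw [this] at h; rw [h] at hns; exact Bool.true_eq_false.mp hns
        rw [List.find?_cons_of_neg (by simpa using hne)] at hf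
        exact ⟨hns, hf⟩
    · rw [pvFirsts]
      rw [if_neg h]
      simp only [List.mem_cons]
      rw [ih]
      have hq : PySem.Set.contains s q.1 = false := by
        simpa using h
      constructor
      · rintro (rfl | ⟨hns, hf⟩)
        · exact ⟨hq, by simp [List.find?_cons_of_pos]⟩
        · have hsadd : q.1 ∈ PySem.Set.add s q.1 :=
            (PySem.Set.mem_add _ _ _).mpr (Or.inr rfl)
          have hne : p.1 ≠ q.1 := by
            intro he
            have : p.1 ∈ PySem.Set.add s q.1 := he ▸ hsadd
            rw [← PySem.Set.contains_iff] at this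
            rw [this] at hns; exact Bool.true_eq_false.mp hns
          have hns' : PySem.Set.contains s p.1 = false := by
            cases hx : PySem.Set.contains s p.1 with
            | false => rfl
            | true =>
              exfalso
              have hm1 : p.1 ∈ s := (PySem.Set.contains_iff s p.1).mp hx
              have hm2 : p.1 ∈ PySem.Set.add s q.1 := (PySem.Set.mem_add _ _ _).mpr (Or.inl hm1)
              rw [← PySem.Set.contains_iff] at hm2
              rw [hm2] at hns; exact Bool.true_eq_false.mp hns
          refine ⟨hns', ?_⟩
          have hbq : ¬ ((fun r : Int × Int => r.1 == p.1) q = true) := by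
            simp only [beq_iff_eq]
            exact fun hb => hne hb.symm
          have hstep : List.find? (fun r : Int × Int => r.1 == p.1) (q :: t)
              = List.find? (fun r : Int × Int => r.1 == p.1) t :=
            List.find?_cons_of_neg hbq
          rw [hstep, hf]
      · rintro ⟨hns, hf⟩
        by_cases hqp : q.1 = p.1
        · left
          rw [List.find?_cons_of_pos (by simpa using hqp)] at hf
          exact (Option.some_inj.mp hf).symm
        · right
          rw [List.find?_cons_of_neg (by simpa using hqp)] at hf
          refine ⟨?_, hf⟩
          cases hx : PySem.Set.contains (PySem.Set.add s q.1) p.1 with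
          | false => rfl
          | true =>
            exfalso
            have := (PySem.Set.contains_iff _ p.1).mp hx
            rcases (PySem.Set.mem_add _ _ _).mp this with hm | he
            · rw [← PySem.Set.contains_iff] at hm; rw [hm] at hns
              exact Bool.true_eq_false.mp hns
            · exact hqp he.symm

-- pvFirsts is a sublist of its input
theorem pvFirsts_sublist (l : List (Int × Int)) (s : PySem.Set Int) :
    (pvFirsts s l).Sublist l := by
  induction l generalizing s with
  | nil => simp [pvFirsts]
  | cons q t ih =>
    rw [pvFirsts]
    split
    · exact (ih s).cons q
    · exact (ih _).cons₂ q

-- keys of pvFirsts are pairwise distinct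
theorem pvFirsts_keys_ne (l : List (Int × Int)) (s : PySem.Set Int) :
    (pvFirsts s l).Pairwise (fun p q => p.1 ≠ q.1) := by
  induction l generalizing s with
  | nil => simp [pvFirsts]
  | cons q t ih =>
    rw [pvFirsts]
    split
    · exact ih s
    · refine List.Pairwise.cons ?_ (ih _)
      intro r hr
      have := (pvMem_firsts r t _).mp hr
      intro he
      have hm : r.1 ∈ PySem.Set.add s q.1 := by
        rw [← he]
        exact (PySem.Set.mem_add _ _ _).mpr (Or.inr rfl)
      rw [← PySem.Set.contains_iff] at hm
      rw [hm] at this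
      exact Bool.true_eq_false.mp this.1

-- find? on insertBy over a key-sorted list: the new element is found only if no old one matches
theorem pvFind_insertBy (p : Int × Int) (k : Int) (acc : List (Int × Int))
    (h : acc.Pairwise (fun a b => a.1 ≤ b.1)) :
    (PySem.List.insertBy (fun a b => decide (a.1 < b.1)) p acc).find? (fun q => q.1 == k)
    = (acc.find? (fun q => q.1 == k)).or (if p.1 = k then some p else none) := by
  induction acc with
  | nil =>
    simp only [PySem.List.insertBy, List.find?, Option.none_or]
    by_cases hpk : p.1 = k
    · simp [hpk]
    · have hb : (p.1 == k) = false := by simpa using hpk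
      simp [hb, hpk]
  | cons a t ih =>
    rw [PySem.List.insertBy]
    by_cases hlt : p.1 < a.1
    · simp only [hlt, decide_true, if_pos]
      by_cases hpk : p.1 = k
      · have hnone : (a :: t).find? (fun q => q.1 == k) = none := by
          rw [List.find?_eq_none]
          intro q hq
          have hak : a.1 ≤ q.1 := by
            rcases List.mem_cons.mp hq with rfl | hqt
            · exact le_refl _
            · exact (List.pairwise_cons.mp h).1 q hqt
          have : k < q.1 := lt_of_lt_of_le (hpk ▸ hlt) hak
          simp only [beq_iff_eq]
          omega
        rw [List.find?_cons_of_pos (by simpa using hpk), hnone]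
        simp [hpk]
      · rw [List.find?_cons_of_neg (by simpa using hpk)]
        simp [hpk]
    · simp only [hlt, decide_false, if_neg, Bool.false_eq_true, not_false_iff]
      by_cases hak : a.1 = k
      · rw [List.find?_cons_of_pos (by simpa using hak),
            List.find?_cons_of_pos (by simpa using hak)]
        simp
      · rw [List.find?_cons_of_neg (by simpa using hak),
            List.find?_cons_of_neg (by simpa using hak)]
        exact ih (List.pairwise_cons.mp h).2

-- STABILITY: the first pair with a given key in the key-sorted list is the first one in the original
theorem pvSorted_find (ps : List (Int × Int)) (k : Int) :
    (PySem.List.sorted ps (fun p => p.1) false).find? (fun q => q.1 == k)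
    = ps.find? (fun q => q.1 == k) := by
  induction ps using List.reverseRecOn with
  | nil => rfl
  | append_singleton t p ih =>
    have hs : PySem.List.sorted (t ++ [p]) (fun p => p.1) false
        = PySem.List.insertBy (fun a b => decide (a.1 < b.1)) p
            (PySem.List.sorted t (fun p => p.1) false) := by
      rw [PySem.List.sorted_eq_foldl_insertBy, PySem.List.sorted_eq_foldl_insertBy,
          List.foldl_append]
      rfl
    rw [hs, pvFind_insertBy p k _ (PySem.List.sorted_pairwise t (fun p => p.1)),
        ih, List.find?_append]
    congr 1
    by_cases hpk : p.1 = k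
    · simp [List.find?, hpk]
    · have hb : (p.1 == k) = false := by simpa using hpk
      simp [List.find?, hb, hpk]

-- B's dict lookup = value of the first pair with that key
theorem pvB_dict_get (l : List (Int × Int)) (d : PySem.Dict Int Int) (k : Int) :
    (l.foldl (fun (d : PySem.Dict Int Int) p =>
        if d.contains p.1 then d else d.insert p.1 p.2) d).get? k
    = (d.get? k).or ((l.find? (fun q => q.1 == k)).map Prod.snd) := by
  induction l generalizing d with
  | nil => simp
  | cons p t ih =>
    rw [List.foldl_cons]
    by_cases hc : d.contains p.1 = true
    · simp only [hc, if_pos]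
      rw [ih]
      by_cases hpk : p.1 = k
      · have : d.get? k ≠ none := by
          intro hnone
          rw [PySem.Dict.get?_eq_none_iff_contains, ← hpk] at hnone
          rw [hnone] at hc; exact Bool.false_ne_true hc
        rcases Option.ne_none_iff_exists'.mp this with ⟨v, hv⟩
        rw [hv]
        simp
      · rw [List.find?_cons_of_neg (by simpa using hpk)]
    · simp only [hc, if_neg, Bool.false_eq_true, not_false_iff]
      rw [ih]
      by_cases hpk : p.1 = k
      · have hd : d.get? k = none := by
          rw [PySem.Dict.get?_eq_none_iff_contains, ← hpk]
          exact Bool.not_eq_true _ ▸ hc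
        rw [hd, List.find?_cons_of_pos (by simpa using hpk),
            PySem.Dict.get?_insert, if_pos hpk.symm]
        simp
      · rw [List.find?_cons_of_neg (by simpa using hpk),
            PySem.Dict.get?_insert, if_neg (fun h => hpk h.symm)]

-- B's dict keys = ordered dedup of the keys of l (past d's keys)
theorem pvB_dict_keys (l : List (Int × Int)) (d : PySem.Dict Int Int) :
    (l.foldl (fun (d : PySem.Dict Int Int) p =>
        if d.contains p.1 then d else d.insert p.1 p.2) d).keys
    = PySem.Set.update d.keys (l.map Prod.fst) := by
  induction l generalizing d with
  | nil => simp [PySem.Set.update]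
  | cons p t ih =>
    rw [List.foldl_cons, List.map_cons, PySem.Set.update_cons]
    by_cases hc : d.contains p.1 = true
    · simp only [hc, if_pos]
      rw [ih]
      congr 1
      exact (PySem.Set.add_of_mem ((PySem.Dict.contains_iff_mem_keys d p.1).mp hc)).symm
    · have hc' : d.contains p.1 = false := by simpa using hc
      simp only [hc', if_neg, Bool.false_eq_true, not_false_iff]
      rw [ih, PySem.Dict.keys_insert_of_not_contains _ _ hc']
      congr 1
      refine (PySem.Set.add_of_not_mem ?_).symm
      intro hm
      rw [← PySem.Dict.contains_iff_mem_keys] at hm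
      exact hc hm

-- B's output loop just reads the sorted keys and their dict values
theorem pvB_out (ks : List Int) (d : PySem.Dict Int Int) (xf yf : List Int) :
    ks.foldl (fun (st : List Int × List Int) k => (st.1 ++ [k], st.2 ++ [d.getD k 0])) (xf, yf)
    = (xf ++ ks, yf ++ ks.map (fun k => d.getD k 0)) := by
  induction ks generalizing xf yf with
  | nil => simp
  | cons k t ih => simp [ih]

-- ===== main equality =====
theorem pvMain (x y : List Int) : sort_lion_xy x y = sort_lion_xy_alt x y := by
  classical
  set ps := x.zip y with hps
  set S := PySem.List.sorted ps (fun p => p.1) false with hS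
  set d := ps.foldl (fun (d : PySem.Dict Int Int) p =>
      if d.contains p.1 then d else d.insert p.1 p.2) PySem.Dict.empty with hd
  set K := PySem.List.sorted d.keys (fun k => k) false with hK
  have hget : ∀ k, d.get? k = (ps.find? (fun q => q.1 == k)).map Prod.snd := by
    intro k
    rw [hd, pvB_dict_get]
    simp
  have hkeys : d.keys = PySem.Set.ofList (ps.map Prod.fst) := by
    rw [hd, pvB_dict_keys]
    simpa using PySem.Set.update_empty (ps.map Prod.fst)
  -- the two pair lists
  set PA := pvFirsts PySem.Set.empty S with hPA
  set PB := K.map (fun k => (k, d.getD k 0)) with hPB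
  -- membership characterisations
  have hmemA : ∀ p, p ∈ PA ↔ ps.find? (fun q => q.1 == p.1) = some p := by
    intro p
    rw [hPA, pvMem_firsts, hS, pvSorted_find]
    simp [PySem.Set.empty, PySem.Set.contains]
  have hmemB : ∀ p, p ∈ PB ↔ ps.find? (fun q => q.1 == p.1) = some p := by
    intro p
    rw [hPB]
    constructor
    · intro hm
      rcases List.mem_map.mp hm with ⟨k, hk, he⟩
      have hkps : k ∈ ps.map Prod.fst := by
        have := (PySem.List.mem_sorted _ _ _ _).mp hk
        rw [hkeys] at this
        exact (PySem.Set.mem_ofList _ _).mp this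
      rcases List.mem_map.mp hkps with ⟨q, hq, hqk⟩
      have hfind : (ps.find? (fun r => r.1 == k)).isSome := by
        rw [List.find?_isSome]
        exact ⟨q, hq, by simp [hqk]⟩
      rcases Option.isSome_iff_exists.mp hfind with ⟨r, hr⟩
      have hrk : r.1 = k := by
        have := List.find?_some hr
        simpa using this
      have hv : d.getD k 0 = r.2 := by
        rw [PySem.Dict.getD_eq_get?_getD, hget, hr]
        simp
      have hpr : p = r := by
        rw [← he, hv, ← hrk]
      rw [hpr, hrk]
      exact hr
    · intro hf
      have hpps : p ∈ ps := List.mem_of_find?_eq_some hf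
      have hpk : p.1 ∈ K := by
        rw [hK, PySem.List.mem_sorted, hkeys, PySem.Set.mem_ofList]
        exact List.mem_map.mpr ⟨p, hpps, rfl⟩
      refine List.mem_map.mpr ⟨p.1, hpk, ?_⟩
      have hv : d.getD p.1 0 = p.2 := by
        rw [PySem.Dict.getD_eq_get?_getD, hget, hf]
        simp
      rw [hv]
  -- both are strictly key-increasing
  have hsortA : PA.Pairwise (fun p q => p.1 < q.1) := by
    have h1 : PA.Pairwise (fun p q => p.1 ≤ q.1) :=
      (PySem.List.sorted_pairwise ps (fun p => p.1)).sublist (pvFirsts_sublist S PySem.Set.empty)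
    have h2 : PA.Pairwise (fun p q => p.1 ≠ q.1) := pvFirsts_keys_ne S PySem.Set.empty
    exact (h1.and h2).imp (fun h => lt_of_le_of_ne h.1 h.2)
  have hsortB : PB.Pairwise (fun p q => p.1 < q.1) := by
    have hKpw : K.Pairwise (fun a b => a < b) := by
      rw [hK, hkeys]
      exact PySem.List.sorted_ofList_pairwise_lt (ps.map Prod.fst)
    rw [hPB]
    exact hKpw.map _ (fun a b h => h)
  -- nodup from strictness
  have hndA : PA.Nodup := hsortA.imp (fun h he => absurd (congrArg Prod.fst he) (ne_of_lt h))
  have hndB : PB.Nodup := hsortB.imp (fun h he => absurd (congrArg Prod.fst he) (ne_of_lt h))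
  have hperm : PA.Perm PB := (List.perm_ext_iff_of_nodup hndA hndB).mpr
    (fun p => (hmemA p).trans (hmemB p).symm)
  have hPAB : PA = PB :=
    List.Perm.eq_of_pairwise (le := fun p q => p.1 < q.1)
      (fun a b _ _ h1 h2 => absurd (lt_trans h1 h2) (lt_irrefl _)) hsortA hsortB hperm
  -- assemble
  show sort_lion_xy x y = sort_lion_xy_alt x y
  rw [sort_lion_xy, sort_lion_xy_alt]
  simp only [← hps, ← hS, ← hd, ← hK]
  rw [pvA_fold, pvB_out]
  simp only [List.nil_append, ← hPA]
  rw [hPAB, hPB]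
  simp only [List.map_map]
  have h1 : (Prod.fst ∘ fun k => (k, d.getD k 0)) = fun k : Int => k := rfl
  have h2 : (Prod.snd ∘ fun k => (k, d.getD k 0)) = fun k : Int => d.getD k 0 := rfl
  rw [h1, h2, List.map_id']

-- ===== VERDICT (by name: the statement is the Claim_ definition above) =====
theorem sort_lion_xy_spec : Claim_equal_sort_lion_xy := by
  intro x y _
  exact pvMain x y
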